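-- pv_equiv track=rewrite | github.com/zivattias/python | lesson12-hw/leetcode_exercises/flowerbed.py | can_plant
-- ===== SOURCE A (Python) =====
-- def can_plant(bed: list[0 | 1], n: int) -> bool:
--     count = 0
--     flowerbed = [0] + bed + [0]
--
--     for i in range(1, len(flowerbed) - 1):
--         if flowerbed[i - 1] == flowerbed[i] == flowerbed[i + 1] == 0:
--             flowerbed[i] = 1
--             count += 1
--
--     return count >= n
-- ===== SOURCE B (Python) =====
-- def can_plant(bed: list, n: int) -> bool:
--     # One pass over the padded bed: each maximal run of L consecutive zeros
--     # (delimited by nonzero cells or the padding) holds (L-1)//2 flowers.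
--     total = 0
--     run = 0
--     for x in [0] + bed + [0]:
--         if x == 0:
--             run += 1
--         else:
--             if run:
--                 total += (run - 1) // 2
--             run = 0
--     total += (run - 1) // 2  # padded bed ends in 0, so run >= 1 here
--     return total >= n
-- ===== Notes on version B (the rewrite author's own statement) =====
-- stated objective: alternative
-- what changed: Replaces A's greedy simulation (building a padded copy and mutating it cell by cell while counting plantings) with a single pass that run-length-encodes zeros and adds the closed form (L-1)//2 per maximal zero run.
import Mathlib
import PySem

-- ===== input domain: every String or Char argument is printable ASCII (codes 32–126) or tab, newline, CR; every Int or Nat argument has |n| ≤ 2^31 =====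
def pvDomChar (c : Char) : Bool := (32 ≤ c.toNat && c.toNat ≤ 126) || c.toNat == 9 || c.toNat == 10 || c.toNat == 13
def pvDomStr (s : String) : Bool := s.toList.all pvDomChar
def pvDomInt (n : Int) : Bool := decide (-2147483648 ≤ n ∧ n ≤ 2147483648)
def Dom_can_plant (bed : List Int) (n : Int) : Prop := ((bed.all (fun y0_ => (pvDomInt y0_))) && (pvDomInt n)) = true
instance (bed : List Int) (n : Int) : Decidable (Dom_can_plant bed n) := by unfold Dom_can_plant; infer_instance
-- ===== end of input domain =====

-- B replaces A's greedy simulation on a padded mutated copy of the bed by a one-pass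
-- run-length count ((L-1)//2 plantable slots per maximal zero run); return value only (A mutates only its local copy).

-- ===== PORT A =====
-- loop body of A: reads flowerbed[i-1], flowerbed[i], flowerbed[i+1]; plants at i
def stepA (st : List Int × Int) (i : Int) : List Int × Int :=
  if PySem.List.pyGetD st.1 (i - 1) 0 = 0 ∧ PySem.List.pyGetD st.1 i 0 = 0 ∧
      PySem.List.pyGetD st.1 (i + 1) 0 = 0 then
    (PySem.List.pySetD st.1 i 1, st.2 + 1)
  else st
def can_plant (bed : List Int) (n : Int) : Bool :=
  let flowerbed := [(0 : Int)] ++ bed ++ [0]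
  let res := (PySem.List.pyRange 1 ((flowerbed.length : Int) - 1) 1).foldl stepA (flowerbed, 0)
  decide (res.2 ≥ n)


-- ===== PORT B =====
-- loop body of B: extend the current zero run, or flush (run-1)//2 at a nonzero cell
def stepB (st : Int × Int) (x : Int) : Int × Int :=
  if x = 0 then (st.1, st.2 + 1)
  else (if st.2 ≠ 0 then st.1 + PySem.Int.floordiv (st.2 - 1) 2 else st.1, 0)

def can_plant_alt (bed : List Int) (n : Int) : Bool :=
  let st := ([(0 : Int)] ++ bed ++ [0]).foldl stepB (0, 0)
  decide (st.1 + PySem.Int.floordiv (st.2 - 1) 2 ≥ n)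


-- ===== PRECONDITION & SPEC =====
def Spec_can_plant (bed : List Int) (n : Int) (out : Bool) : Prop := out = can_plant_alt bed n
instance (bed : List Int) (n : Int) (out : Bool) : Decidable (Spec_can_plant bed n out) := by unfold Spec_can_plant; infer_instance

-- ===== CLAIM (what is proved, stated in full; the proofs are below) =====
def Claim_equal_can_plant : Prop := ∀ (bed : List Int) (n : Int), Dom_can_plant bed n → Spec_can_plant bed n (can_plant bed n)

-- ===== LEMMAS AND PROOFS =====

-- greedy plant count with one cell of lookahead: common characterisation of both ports
def gPlant : Bool → List Int → Int
  | _, [] => 0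
  | pz, x :: xs =>
    if pz = true ∧ x = 0 ∧ xs.headD 0 = 0 then 1 + gPlant false xs
    else gPlant (decide (x = 0)) xs
theorem getD_append_length {α : Type} (q l : List α) (d : α) :
    (q ++ l).getD q.length d = l.getD 0 d := by
  induction q with
  | nil => simp
  | cons a q ih => simpa using ih
theorem set_append_length {α : Type} (q : List α) (l : List α) (z x v : α) :
    (q ++ (z :: (x :: l))).set (q.length + 1) v = q ++ (z :: (v :: l)) := by
  induction q with
  | nil => simp [List.set]
  | cons a q ih => simpa [List.set] using ih
theorem headD_append_zero (xs : List Int) : (xs ++ [(0 : Int)]).getD 0 0 = xs.headD 0 := by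
  cases xs <;> simp

-- A's fold over indices q.length+1 .. with state list q ++ prev :: rest ++ [0] adds gPlant plants
theorem a_inv (rest : List Int) : ∀ (q : List Int) (prev : Int) (c : Int),
    ((PySem.List.pyRange ((q.length + 1 : Nat) : Int) ((q.length + 1 + rest.length : Nat) : Int) 1).foldl
        stepA (q ++ (prev :: (rest ++ [0])), c)).2
      = c + gPlant (decide (prev = 0)) rest := by
  induction rest with
  | nil =>
    intro q prev c
    rw [PySem.List.pyRange_one_eq_nil (by push_cast [List.length_nil]; omega)]
    simp [gPlant]
  | cons x xs ih =>
    intro q prev c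
    rw [PySem.List.pyRange_one_cons (by push_cast [List.length_cons]; omega)]
    simp only [List.foldl_cons]
    have h1 : ((q.length + 1 : Nat) : Int) - 1 = ((q.length : Nat) : Int) := by push_cast; ring
    have h2 : ((q.length + 1 : Nat) : Int) + 1 = ((q.length + 2 : Nat) : Int) := by push_cast; ring
    have e0 : q ++ (prev :: ((x :: xs) ++ [(0:Int)])) = (q ++ [prev]) ++ (x :: (xs ++ [0])) := by simp
    have e1 : q ++ (prev :: ((x :: xs) ++ [(0:Int)])) = (q ++ [prev, x]) ++ (xs ++ [0]) := by simp
    have rA : PySem.List.pyGetD (q ++ (prev :: ((x :: xs) ++ [(0:Int)]))) (((q.length + 1 : Nat) : Int) - 1) 0 = prev := by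
      rw [h1, PySem.List.pyGetD_natCast, getD_append_length]; rfl
    have rB : PySem.List.pyGetD (q ++ (prev :: ((x :: xs) ++ [(0:Int)]))) ((q.length + 1 : Nat) : Int) 0 = x := by
      rw [PySem.List.pyGetD_natCast, e0]
      have hl : q.length + 1 = (q ++ [prev]).length := by simp
      rw [hl, getD_append_length]; rfl
    have rC : PySem.List.pyGetD (q ++ (prev :: ((x :: xs) ++ [(0:Int)]))) (((q.length + 1 : Nat) : Int) + 1) 0 = xs.headD 0 := by
      rw [h2, PySem.List.pyGetD_natCast, e1]
      have hl : q.length + 2 = (q ++ [prev, x]).length := by simp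
      rw [hl, getD_append_length, headD_append_zero]
    have rS : PySem.List.pySetD (q ++ (prev :: ((x :: xs) ++ [(0:Int)]))) ((q.length + 1 : Nat) : Int) 1 = (q ++ [prev]) ++ (1 :: (xs ++ [0])) := by
      rw [PySem.List.pySetD_natCast]
      have : (x :: xs) ++ [(0:Int)] = x :: (xs ++ [0]) := by simp
      rw [this, set_append_length]; simp
    have hrng : ((q.length + 1 : Nat) : Int) + 1 = (((q ++ [prev]).length + 1 : Nat) : Int) := by
      simp
    have hrng2 : ((q.length + 1 + (x :: xs).length : Nat) : Int) = (((q ++ [prev]).length + 1 + xs.length : Nat) : Int) := by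
      simp [List.length_append, List.length_cons]; push_cast; omega
    by_cases hcond : prev = 0 ∧ x = 0 ∧ xs.headD 0 = 0
    · have hstep : stepA (q ++ (prev :: ((x :: xs) ++ [(0:Int)])), c) ((q.length + 1 : Nat) : Int)
          = ((q ++ [prev]) ++ (1 :: (xs ++ [0])), c + 1) := by
        simp only [stepA, rA, rB, rC, rS]
        rw [if_pos hcond]
      rw [hstep, hrng, hrng2, ih (q ++ [prev]) 1 (c + 1), gPlant]
      rw [if_pos ⟨by simp [hcond.1], hcond.2.1, hcond.2.2⟩]
      simp [gPlant]
      ring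
    · have hstep : stepA (q ++ (prev :: ((x :: xs) ++ [(0:Int)])), c) ((q.length + 1 : Nat) : Int)
          = ((q ++ [prev]) ++ (x :: (xs ++ [0])), c) := by
        simp only [stepA, rA, rB, rC]
        rw [if_neg hcond, e0]
      rw [hstep, hrng, hrng2, ih (q ++ [prev]) x c, gPlant]
      rw [if_neg (by simpa using hcond)]

theorem a_char (bed : List Int) (n : Int) :
    can_plant bed n = decide (gPlant true bed ≥ n) := by
  have h := a_inv bed [] 0 0
  simp only [can_plant]
  push_cast at h ⊢
  simp only [List.nil_append, List.length_nil, List.length_append, List.length_cons] at h ⊢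
  push_cast at h ⊢
  rw [show (1:Int) + ↑bed.length + 1 - 1 = 1 + ↑bed.length by ring,
    show [(0:Int)] ++ bed ++ [0] = 0 :: (bed ++ [0]) by simp, h]
  simp


-- B's fold from state (t, r) over l plus the trailing pad and final flush
def bFin (t r : Int) (l : List Int) : Int :=
  let st := (l ++ [0]).foldl stepB (t, r)
  st.1 + PySem.Int.floordiv (st.2 - 1) 2

theorem fd2 (a : Int) (h : 0 ≤ a) : PySem.Int.floordiv a 2 = a / 2 :=
  PySem.Int.floordiv_eq_ediv_of_pos (by omega)

theorem b_nil (t r : Int) (hr : 0 ≤ r) :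
    bFin t r [] = t + gPlant (decide (r % 2 = 1)) [] + r / 2 := by
  simp [bFin, stepB, gPlant, fd2 r hr]

theorem b_key : ∀ (N : Nat) (l : List Int), l.length ≤ N → ∀ (t r : Int), 0 ≤ r →
    (r % 2 = 0 → r ≠ 0 → l.head? = some 0) →
    bFin t r l = t + gPlant (decide (r % 2 = 1)) l + r / 2 := by
  intro N
  induction N with
  | zero =>
    intro l hl t r hr _
    have : l = [] := List.eq_nil_of_length_eq_zero (by omega)
    subst this
    exact b_nil t r hr
  | succ N ih =>
    intro l hl t r hr H
    match l with
    | [] => exact b_nil t r hr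
    | x :: xs =>
      by_cases hx : x = 0
      · subst hx
        have step1 : bFin t r (0 :: xs) = bFin t (r + 1) xs := by
          simp [bFin, stepB]
        rw [step1]
        match xs with
        | [] =>
          rw [b_nil t (r + 1) (by omega)]
          by_cases hp : r % 2 = 1
          · have h0 : (r + 1) % 2 = 0 := by omega
            simp [gPlant, hp, h0]
            omega
          · have h0 : r % 2 = 0 := by omega
            have h1 : (r + 1) % 2 = 1 := by omega
            simp [gPlant, hp, h1]
            omega
        | y :: ys =>
          by_cases hy : y = 0
          · subst hy
            rw [ih (0 :: ys) (by simp at hl ⊢; omega) t (r + 1) (by omega) (by simp)]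
            by_cases hp : r % 2 = 1
            · have h0 : (r + 1) % 2 = 0 := by omega
              simp [gPlant, hp, h0]
              generalize gPlant false (0 :: ys) = G
              omega
            · have h0 : r % 2 = 0 := by omega
              have h1 : (r + 1) % 2 = 1 := by omega
              simp [gPlant, hp, h1]
              generalize gPlant true (0 :: ys) = G
              omega
          · have step2 : bFin t (r + 1) (y :: ys) = bFin (t + PySem.Int.floordiv (r + 1 - 1) 2) 0 ys := by
              simp [bFin, stepB, hy, show ¬(r + 1 = 0) by omega]
            have hr1 : r + 1 - 1 = r := by ring
            rw [step2, hr1, ih ys (by simp at hl; omega) _ 0 (by omega) (by simp)]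
            have hG : gPlant (decide (r % 2 = 1)) (0 :: y :: ys) = gPlant false ys := by
              simp [gPlant, hy]
            rw [hG, fd2 r hr]
            norm_num
            generalize gPlant false ys = G
            omega
      · have hcase : r % 2 = 1 ∨ r = 0 := by
          by_cases h0 : r = 0
          · right; exact h0
          · left
            have : ¬ r % 2 = 0 := fun he => hx (by simpa using H he h0)
            omega
        have hG : gPlant (decide (r % 2 = 1)) (x :: xs) = gPlant false xs := by
          by_cases hp : r % 2 = 1 <;> simp [gPlant, hx, hp]
        rcases hcase with hodd | hz
        · have hrne : r ≠ 0 := by omega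
          have step1 : bFin t r (x :: xs) = bFin (t + PySem.Int.floordiv (r - 1) 2) 0 xs := by
            simp [bFin, stepB, hx, hrne]
          rw [step1, ih xs (by simp at hl; omega) _ 0 (by omega) (by simp), hG,
            fd2 (r - 1) (by omega)]
          norm_num
          generalize gPlant false xs = G
          omega
        · subst hz
          have step1 : bFin t 0 (x :: xs) = bFin t 0 xs := by
            simp [bFin, stepB, hx]
          rw [step1, ih xs (by simp at hl; omega) t 0 (by omega) (by simp), hG]
          norm_num

theorem b_char (bed : List Int) (n : Int) :
    can_plant_alt bed n = decide (gPlant true bed ≥ n) := by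
  have h := b_key bed.length bed le_rfl 0 1 (by omega) (by omega)
  norm_num at h
  simp only [can_plant_alt, show [(0:Int)] ++ bed ++ [0] = 0 :: (bed ++ [0]) by simp,
    List.foldl_cons, show stepB (0, 0) 0 = (0, 1) by simp [stepB]]
  rw [show (List.foldl stepB (0, 1) (bed ++ [0])).1 +
      PySem.Int.floordiv ((List.foldl stepB (0, 1) (bed ++ [0])).2 - 1) 2 = bFin 0 1 bed from rfl, h]

-- ===== VERDICT (by name: the statement is the Claim_ definition above) =====
theorem can_plant_spec : Claim_equal_can_plant := by
  intro bed n _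
  unfold Spec_can_plant
  rw [a_char, b_char]
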